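-- pv_equiv track=rewrite | github.com/fmaja/Metri | src/metri/views/akordy.py | _format_intervals
-- ===== SOURCE A (Python) =====
-- def _format_intervals(semitones: list[int]) -> str:
--     """Return a compact numeric interval representation like '1–3–5–b7' for a chord.
--
--     Rules:
--     - Base mapping relative to root (C): 0:1, 1:b2, 2:2, 3:b3, 4:3, 5:4, 6:b5, 7:5, 8:#5, 9:6, 10:b7, 11:7
--     - Extensions: 2→9, 4→11, 6→13 when above octave (>=12 semitones)
--     - Accidentals are preserved when extending (b2→b9, #4→#11, etc.)
--     - Keeps ascending order as provided in the chord definition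
--     """
--     base_map = {
--         0: ("1", 1),
--         1: ("b2", 2),
--         2: ("2", 2),
--         3: ("b3", 3),
--         4: ("3", 3),
--         5: ("4", 4),
--         6: ("b5", 5),
--         7: ("5", 5),
--         8: ("#5", 5),
--         9: ("6", 6),
--         10: ("b7", 7),
--         11: ("7", 7),
--     }
--
--     # Special case: fully diminished seventh chord 1–b3–b5–bb7 (enharmonically 1–b3–b5–6)
--     if len(semitones) == 4 and set([x % 12 for x in semitones]) == {0, 3, 6, 9}:
--         return "1–b3–b5–bb7"
--
--     tokens: list[str] = []
--     for s in semitones: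
--         r = s % 12
--         octs = s // 12
--         token, deg = base_map.get(r, ("?", None))
--         if octs >= 1:
--             # Handle altered tensions explicitly
--             if r == 3:
--                 # 15 semitones above root -> #9
--                 token = "#9"
--                 tokens.append(token)
--                 continue
--             if deg == 2:
--                 token = token.replace("2", "9")  # b2->b9, 2->9
--             elif deg == 4:
--                 # handle #4 vs 4
--                 if token.startswith("#"):
--                     token = token.replace("4", "11")  # #4 -> #11
--                 else:
--                     token = token.replace("4", "11")
--             elif deg == 6:
--                 token = token.replace("6", "13")
--             # 1,3,5,7 remain 1,3,5,7 by convention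
--         tokens.append(token)
--
--     return "–".join(tokens)
-- ===== SOURCE B (Python) =====
-- # Table-driven rewrite: the extension branch cascade is encoded in a second lookup table.
-- _BASE = ["1", "b2", "2", "b3", "3", "4", "b5", "5", "#5", "6", "b7", "7"]
-- _EXT  = ["1", "b9", "9", "#9", "3", "11", "b5", "5", "#5", "13", "b7", "7"]
--
--
-- def _format_intervals(semitones: list[int]) -> str:
--     if len(semitones) == 4 and {x % 12 for x in semitones} == {0, 3, 6, 9}:
--         return "1–b3–b5–bb7"
--     return "–".join((_EXT if s >= 12 else _BASE)[s % 12] for s in semitones)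
-- ===== Notes on version B (the rewrite author's own statement) =====
-- stated objective: simpler
-- what changed: Replaces the dict of (token, degree) pairs plus the octave-extension if/elif/replace cascade by two direct residue-to-token tables (base and above-octave), selected by s >= 12 and joined in one comprehension.
import Mathlib
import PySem

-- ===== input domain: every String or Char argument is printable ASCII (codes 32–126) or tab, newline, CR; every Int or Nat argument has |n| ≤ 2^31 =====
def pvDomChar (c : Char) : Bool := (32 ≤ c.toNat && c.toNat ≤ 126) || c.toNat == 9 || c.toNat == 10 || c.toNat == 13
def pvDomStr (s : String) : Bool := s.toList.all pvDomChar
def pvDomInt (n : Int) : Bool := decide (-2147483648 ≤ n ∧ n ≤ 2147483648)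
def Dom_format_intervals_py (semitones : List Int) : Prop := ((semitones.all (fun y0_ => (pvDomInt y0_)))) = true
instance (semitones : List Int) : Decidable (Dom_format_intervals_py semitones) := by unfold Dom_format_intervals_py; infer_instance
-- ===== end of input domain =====

-- B replaces A's (token, degree) dict plus extension branch cascade by two residue-to-token tables; objective: simpler.

-- ===== PORT A =====
def pvBaseMap : PySem.Dict Int (String × Option Int) :=
  PySem.Dict.ofList [(0, ("1", some 1)), (1, ("b2", some 2)), (2, ("2", some 2)),
    (3, ("b3", some 3)), (4, ("3", some 3)), (5, ("4", some 4)), (6, ("b5", some 5)),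
    (7, ("5", some 5)), (8, ("#5", some 5)), (9, ("6", some 6)), (10, ("b7", some 7)),
    (11, ("7", some 7))]

-- A's loop body: compute the token appended for one semitone (the r == 3 'continue' also appends "#9").
def pvTokenA (s : Int) : String :=
  let r := PySem.Int.mod s 12
  let octs := PySem.Int.floordiv s 12
  let td := (pvBaseMap.get? r).getD ("?", none)
  let token := td.1
  let deg := td.2
  if 1 ≤ octs then
    if r = 3 then "#9"
    else if deg = some 2 then PySem.Str.replace token "2" "9"
    else if deg = some 4 then
      if PySem.Str.startswith token "#" then PySem.Str.replace token "4" "11"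
      else PySem.Str.replace token "4" "11"
    else if deg = some 6 then PySem.Str.replace token "6" "13"
    else token
  else token

def format_intervals_py (semitones : List Int) : String :=
  if semitones.length = 4 ∧
      PySem.Set.equal (PySem.Set.ofList (semitones.map (fun x => PySem.Int.mod x 12)))
        (PySem.Set.ofList [0, 3, 6, 9]) then
    "1–b3–b5–bb7"
  else
    PySem.Str.join "–" (semitones.foldl (fun tokens s => tokens ++ [pvTokenA s]) [])

-- ===== PORT B =====
def pvBaseTbl : List String := ["1", "b2", "2", "b3", "3", "4", "b5", "5", "#5", "6", "b7", "7"]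
def pvExtTbl : List String := ["1", "b9", "9", "#9", "3", "11", "b5", "5", "#5", "13", "b7", "7"]

def format_intervals_py_alt (semitones : List Int) : String :=
  if semitones.length = 4 ∧
      PySem.Set.equal (PySem.Set.ofList (semitones.map (fun x => PySem.Int.mod x 12)))
        (PySem.Set.ofList [0, 3, 6, 9]) then
    "1–b3–b5–bb7"
  else
    -- list index: 0 ≤ s % 12 < 12 always, so the default is never used (exact)
    PySem.Str.join "–"
      (semitones.map (fun s =>
        PySem.List.pyGetD (if 12 ≤ s then pvExtTbl else pvBaseTbl) (PySem.Int.mod s 12) "?"))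

-- ===== PRECONDITION & SPEC =====
def Spec_format_intervals_py (semitones : List Int) (out : String) : Prop := out = format_intervals_py_alt semitones
instance (semitones : List Int) (out : String) : Decidable (Spec_format_intervals_py semitones out) := by unfold Spec_format_intervals_py; infer_instance

-- ===== CLAIM (what is proved, stated in full; the proofs are below) =====
def Claim_equal_format_intervals_py : Prop := ∀ (semitones : List Int), Dom_format_intervals_py semitones → Spec_format_intervals_py semitones (format_intervals_py semitones)

-- ===== LEMMAS AND PROOFS =====
lemma pvTokenA_eq (s : Int) :
    pvTokenA s = PySem.List.pyGetD (if 12 ≤ s then pvExtTbl else pvBaseTbl) (PySem.Int.mod s 12) "?" := by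
  have h1 : ((1:Int) ≤ PySem.Int.floordiv s 12) ↔ 12 ≤ s := by
    rw [PySem.Int.le_floordiv_iff_mul_le (by norm_num : (0:Int) < 12)]; omega
  have h0 : 0 ≤ PySem.Int.mod s 12 := PySem.Int.mod_nonneg s (by norm_num)
  have h12 : PySem.Int.mod s 12 < 12 := PySem.Int.mod_lt s (by norm_num)
  unfold pvTokenA
  by_cases hoct : 12 ≤ s
  · simp only [h1, hoct, if_pos]
    have hr : PySem.Int.mod s 12 = 0 ∨ PySem.Int.mod s 12 = 1 ∨ PySem.Int.mod s 12 = 2 ∨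
        PySem.Int.mod s 12 = 3 ∨ PySem.Int.mod s 12 = 4 ∨ PySem.Int.mod s 12 = 5 ∨
        PySem.Int.mod s 12 = 6 ∨ PySem.Int.mod s 12 = 7 ∨ PySem.Int.mod s 12 = 8 ∨
        PySem.Int.mod s 12 = 9 ∨ PySem.Int.mod s 12 = 10 ∨ PySem.Int.mod s 12 = 11 := by omega
    rcases hr with h | h | h | h | h | h | h | h | h | h | h | h <;> rw [h] <;> decide
  · simp only [h1, hoct, if_false]
    have hr : PySem.Int.mod s 12 = 0 ∨ PySem.Int.mod s 12 = 1 ∨ PySem.Int.mod s 12 = 2 ∨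
        PySem.Int.mod s 12 = 3 ∨ PySem.Int.mod s 12 = 4 ∨ PySem.Int.mod s 12 = 5 ∨
        PySem.Int.mod s 12 = 6 ∨ PySem.Int.mod s 12 = 7 ∨ PySem.Int.mod s 12 = 8 ∨
        PySem.Int.mod s 12 = 9 ∨ PySem.Int.mod s 12 = 10 ∨ PySem.Int.mod s 12 = 11 := by omega
    rcases hr with h | h | h | h | h | h | h | h | h | h | h | h <;> rw [h] <;> decide

-- ===== VERDICT (by name: the statement is the Claim_ definition above) =====
theorem format_intervals_py_spec : Claim_equal_format_intervals_py := by
  intro semitones _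
  unfold Spec_format_intervals_py format_intervals_py format_intervals_py_alt
  split_ifs with h
  · rfl
  · congr 1
    rw [PySem.List.foldl_append_singleton_eq_map]
    exact List.map_congr_left (fun s _ => pvTokenA_eq s)
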